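-- pv_equiv track=rewrite | github.com/MADAO81/Codewars_tasks | Pines Deaf Grandma 6 kyu.py | deaf_grandma
-- ===== SOURCE A (Python) =====
-- def deaf_grandma(you):
--     res = []
--     for word in you:
--         if word.isupper():
--             if word == "BYE":
--                 res.append("OK, BYE!")
--                 break
--             else:
--                 res.append("NO, NOT SINCE 1938!")
--         else:
--             res.append("HUH?! SPEAK UP, SONNY!")
--     return res
-- ===== SOURCE B (Python) =====
-- def deaf_grandma(you):
--     try:
--         words = you[:you.index("BYE") + 1]
--     except ValueError:
--         words = you
--     return ["OK, BYE!" if w == "BYE"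
--             else "NO, NOT SINCE 1938!" if w.isupper()
--             else "HUH?! SPEAK UP, SONNY!"
--             for w in words]
-- ===== Notes on version B (the rewrite author's own statement) =====
-- stated objective: simpler
-- what changed: Replaces the loop-with-break accumulator by a find-the-first-BYE-then-map decomposition: cut the list at the first "BYE" (inclusive) and map each word to its response in one comprehension.
import Mathlib
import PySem

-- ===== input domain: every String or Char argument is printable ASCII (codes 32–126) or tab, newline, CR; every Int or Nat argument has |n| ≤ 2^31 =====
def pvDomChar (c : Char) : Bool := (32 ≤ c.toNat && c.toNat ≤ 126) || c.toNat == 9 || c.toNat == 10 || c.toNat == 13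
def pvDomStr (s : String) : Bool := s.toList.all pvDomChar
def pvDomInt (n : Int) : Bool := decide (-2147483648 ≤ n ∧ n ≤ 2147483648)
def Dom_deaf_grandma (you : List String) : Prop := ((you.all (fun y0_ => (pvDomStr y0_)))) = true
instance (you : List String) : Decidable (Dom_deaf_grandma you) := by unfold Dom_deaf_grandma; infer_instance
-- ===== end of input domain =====

-- B replaces A's loop-with-break accumulator by a find-first-"BYE"-then-map decomposition (objective: simpler).

-- Python str.isupper() on the ASCII domain: at least one uppercase letter and no lowercase letter
-- (ASCII cased characters are exactly the letters, so this is exact on Dom).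
def pvStrIsupper (s : String) : Bool :=
  s.toList.any PySem.Chars.isupper && s.toList.all (fun c => !PySem.Chars.islower c)

-- ===== PORT A =====
-- literal transliteration of A's for-loop with break, as structural recursion on the list
def deaf_grandma (you : List String) : List String :=
  match you with
  | [] => []
  | w :: ws =>
    if pvStrIsupper w then
      if w == "BYE" then ["OK, BYE!"]               -- append then break
      else "NO, NOT SINCE 1938!" :: deaf_grandma ws
    else "HUH?! SPEAK UP, SONNY!" :: deaf_grandma ws

-- ===== PORT B =====
-- the conditional expression inside Source B's comprehension
def pvResp (w : String) : String :=
  if w == "BYE" then "OK, BYE!"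
  else if pvStrIsupper w then "NO, NOT SINCE 1938!"
  else "HUH?! SPEAK UP, SONNY!"

def deaf_grandma_alt (you : List String) : List String :=
  let words :=
    match PySem.List.index? you "BYE" with          -- you.index("BYE") / ValueError
    | some i => PySem.List.slice you none (some ((i : Int) + 1))  -- you[:i+1]
    | none => you
  words.map pvResp

-- ===== PRECONDITION & SPEC =====
def Spec_deaf_grandma (you : List String) (out : List String) : Prop := out = deaf_grandma_alt you
instance (you : List String) (out : List String) : Decidable (Spec_deaf_grandma you out) := by unfold Spec_deaf_grandma; infer_instance

-- ===== CLAIM (what is proved, stated in full; the proofs are below) =====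
def Claim_equal_deaf_grandma : Prop := ∀ (you : List String), Dom_deaf_grandma you → Spec_deaf_grandma you (deaf_grandma you)

-- ===== LEMMAS AND PROOFS =====

theorem a_cons_ne (w : String) (ws : List String) (h : w ≠ "BYE") :
    deaf_grandma (w :: ws) = pvResp w :: deaf_grandma ws := by
  have hbe : (w == "BYE") = false := by simp [h]
  by_cases hu : pvStrIsupper w = true
  · simp [deaf_grandma, pvResp, hu, hbe]
  · simp [deaf_grandma, pvResp, eq_false_of_ne_true hu, hbe]

theorem alt_cons_bye (ws : List String) : deaf_grandma_alt ("BYE" :: ws) = ["OK, BYE!"] := by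
  have h0 : PySem.List.index? ("BYE" :: ws) "BYE" = some 0 := PySem.List.index?_cons_self ..
  simp only [deaf_grandma_alt, h0]
  rw [show ((0 : Nat) : Int) + 1 = ((1 : Nat) : Int) by norm_num, PySem.List.slice_to_natCast]
  simp [pvResp]

theorem alt_cons_ne (w : String) (ws : List String) (h : w ≠ "BYE") :
    deaf_grandma_alt (w :: ws) = pvResp w :: deaf_grandma_alt ws := by
  simp only [deaf_grandma_alt]
  rw [PySem.List.index?_cons_of_ne _ h]
  cases hi : PySem.List.index? ws "BYE" with
  | none => simp
  | some i =>
    simp only [Option.map_some]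
    rw [show ((i + 1 : Nat) : Int) + 1 = ((i + 2 : Nat) : Int) by push_cast; ring,
        PySem.List.slice_to_natCast,
        show ((i : Nat) : Int) + 1 = ((i + 1 : Nat) : Int) by push_cast; ring,
        PySem.List.slice_to_natCast]
    simp [List.take_succ_cons]

-- ===== VERDICT (by name: the statement is the Claim_ definition above) =====
theorem deaf_grandma_spec : Claim_equal_deaf_grandma := by
  intro you hdom
  clear hdom
  unfold Spec_deaf_grandma
  induction you with
  | nil => rfl
  | cons w ws ih =>
    by_cases hb : w = "BYE"
    · subst hb
      rw [alt_cons_bye]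
      have hu : pvStrIsupper "BYE" = true := by decide
      simp [deaf_grandma, hu]
    · rw [a_cons_ne w ws hb, alt_cons_ne w ws hb, ih]
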